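-- pv_equiv track=rewrite | github.com/Be-better-Do-better/nudge-in-miami-bangor | CorpusAnalyses/MonolingualSequencesAnalysis/mono_tag_series_analysis.py | get_frequency_of_lengths_of_subsequences
-- ===== SOURCE A (Python) =====
-- def get_list_of_tags(lists_of_list_of_tag_series: list[list[str]]) -> list:
-- 	flat_list = [tag for sublist in lists_of_list_of_tag_series for tag in sublist]
-- 	return list(set(flat_list))
--
-- def subsequences_lengths_extractor(tags_sequence_extracted: list[str]) -> list[(str, int)]:
-- 	"""
-- 	This function "squoshes" the sub-sequences of mono-lingual tags into pairs of (tag, length of sub-sequence).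
-- 	e.g.: the sequence: ['eng', 'eng', 'spa'] will be squoshed into [('eng', 2), ('spa', 1)]
-- 	:param tags_sequence_extracted:
-- 	:return: list of (tag, sub-sequence length)
-- 	"""
-- 	tags_sequence_squoshed = []
-- 	i = 0
-- 	current_subsequence_length = 0
-- 	prev_tag = None
-- 	while i < len(tags_sequence_extracted):
-- 		curr_tag = tags_sequence_extracted[i]
-- 		if (prev_tag is None) or (curr_tag == prev_tag):
-- 			current_subsequence_length += 1
-- 		else:
-- 			tags_sequence_squoshed.append((prev_tag, current_subsequence_length))
-- 			current_subsequence_length = 1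
-- 		prev_tag = curr_tag
-- 		i += 1
--
-- 	if not(current_subsequence_length == 0):
-- 		tags_sequence_squoshed.append((prev_tag, current_subsequence_length))
-- 	return tags_sequence_squoshed
--
-- def get_frequency_of_lengths_of_subsequences(lists_of_list_of_tag_series: list[list[str]]) -> dict:
-- 	temp_relative_frequency_of_subsequences = {}
--
-- 	found_tags = get_list_of_tags(lists_of_list_of_tag_series)
-- 	for tag in found_tags:
-- 		temp_relative_frequency_of_subsequences[tag] = {}
--
-- 	for tag_list in lists_of_list_of_tag_series:
-- 		squoshed_tag_list = subsequences_lengths_extractor(tag_list)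
-- 		for tag, subsequence_length in squoshed_tag_list:
-- 			if subsequence_length in temp_relative_frequency_of_subsequences[tag].keys():
-- 				temp_relative_frequency_of_subsequences[tag][subsequence_length] += 1
-- 			else:
-- 				temp_relative_frequency_of_subsequences[tag][subsequence_length] = 1
--
-- 	relative_frequency_of_subsequences = {}
-- 	for tag in found_tags:
-- 		relative_frequency_of_subsequences[tag] = convert_to_frequency_vector(temp_relative_frequency_of_subsequences[tag])
-- 	return relative_frequency_of_subsequences
--
-- def convert_to_frequency_vector(frequency_counter: dict) -> list:
-- 	max_key = max(frequency_counter.keys())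
-- 	frequency_vector = [0 for _ in range(max_key+1)]
-- 	for i, frequency in frequency_counter.items():
-- 		frequency_vector[i] = frequency
-- 	return frequency_vector
-- ===== SOURCE B (Python) =====
-- def get_frequency_of_lengths_of_subsequences(lists_of_list_of_tag_series: list[list[str]]) -> dict:
--     flat = [tag for sub in lists_of_list_of_tag_series for tag in sub]
--     result = {}
--     for tag in dict.fromkeys(flat):
--         hist = {}
--         for sub in lists_of_list_of_tag_series:
--             run = 0
--             for x in sub:
--                 if x == tag:
--                     run += 1
--                 else:
--                     if run != 0:
--                         hist[run] = hist.get(run, 0) + 1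
--                     run = 0
--             if run != 0:
--                 hist[run] = hist.get(run, 0) + 1
--         result[tag] = [hist.get(i, 0) for i in range(max(hist) + 1)]
--     return result
-- ===== Notes on version B (the rewrite author's own statement) =====
-- stated objective: alternative
-- what changed: B never run-length-encodes a sequence into (tag, length) pairs: for each distinct tag it re-scans the sequences with a single run counter that counts consecutive occurrences of that tag and flushes directly into that tag's length histogram, trading A's one generic RLE pass plus pre-seeded nested dict for per-tag counting scans.
import Mathlib
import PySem

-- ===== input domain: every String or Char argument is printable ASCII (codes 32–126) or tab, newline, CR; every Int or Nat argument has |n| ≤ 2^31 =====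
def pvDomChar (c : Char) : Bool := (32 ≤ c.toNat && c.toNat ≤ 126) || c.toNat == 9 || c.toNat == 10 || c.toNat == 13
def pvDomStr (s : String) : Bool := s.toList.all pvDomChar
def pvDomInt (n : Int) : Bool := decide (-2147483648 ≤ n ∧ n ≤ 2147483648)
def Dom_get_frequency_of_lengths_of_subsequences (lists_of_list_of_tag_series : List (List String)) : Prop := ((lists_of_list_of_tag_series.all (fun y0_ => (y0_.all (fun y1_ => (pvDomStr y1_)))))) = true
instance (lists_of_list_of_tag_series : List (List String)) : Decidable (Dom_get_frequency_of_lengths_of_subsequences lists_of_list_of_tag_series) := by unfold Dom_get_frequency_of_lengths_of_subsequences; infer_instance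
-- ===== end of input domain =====

-- B never run-length-encodes a sequence into (tag, length) pairs: for each distinct tag it
-- re-scans the sequences with a single run counter for that tag, flushing directly into that
-- tag's length histogram. Objective: alternative (per-tag scans instead of one generic RLE pass).
-- A's Python iterates a set in hash order; dicts are compared ignoring key order.

-- ===== PORT A =====
-- list(set(flat_list)): CPython's hash iteration order is not modelled; ported in first-occurrence order
def get_list_of_tags (lists_of_list_of_tag_series : List (List String)) : List String :=
  let flat_list := lists_of_list_of_tag_series.flatMap (fun sublist => sublist)
  PySem.Set.ofList flat_list

-- the while-loop of subsequences_lengths_extractor, one step per element of the remaining list;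
-- at both append sites prev_tag is provably ≠ none, so `.getD ""` never supplies its default
def pvSquoshGo (rest : List String) (prev_tag : Option String) (current_subsequence_length : Int)
    (acc : List (String × Int)) : List (String × Int) :=
  match rest with
  | [] =>
      if ¬ (current_subsequence_length = 0) then
        acc ++ [(prev_tag.getD "", current_subsequence_length)]
      else acc
  | curr_tag :: rest' =>
      if prev_tag = none ∨ some curr_tag = prev_tag then
        pvSquoshGo rest' (some curr_tag) (current_subsequence_length + 1) acc
      else
        pvSquoshGo rest' (some curr_tag) 1 (acc ++ [(prev_tag.getD "", current_subsequence_length)])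

def subsequences_lengths_extractor (tags_sequence_extracted : List String) : List (String × Int) :=
  pvSquoshGo tags_sequence_extracted none 0 []

-- temp[tag] cannot raise KeyError (tag was pre-seeded), so getD's default Dict is never consulted
def pvCountA (temp : PySem.Dict String (PySem.Dict Int Int)) (r : String × Int) :
    PySem.Dict String (PySem.Dict Int Int) :=
  let inner := temp.getD r.1 PySem.Dict.empty
  if inner.contains r.2 then temp.insert r.1 (inner.insert r.2 (inner.getD r.2 0 + 1))
  else temp.insert r.1 (inner.insert r.2 1)

-- max(keys): the dict is never empty at A's call sites (Python would raise ValueError), so getD 0 is never consulted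
def convert_to_frequency_vector (frequency_counter : PySem.Dict Int Int) : List Int :=
  let max_key := (PySem.List.max? frequency_counter.keys (fun k => k)).getD 0
  let frequency_vector := (PySem.List.pyRange 0 (max_key + 1)).map (fun _ => (0 : Int))
  frequency_counter.items.foldl (fun v p => PySem.List.pySetD v p.1 p.2) frequency_vector

def get_frequency_of_lengths_of_subsequences (lists_of_list_of_tag_series : List (List String)) :
    List (String × List Int) :=
  let found_tags := get_list_of_tags lists_of_list_of_tag_series
  let temp0 := found_tags.foldl (fun d tag => d.insert tag PySem.Dict.empty) PySem.Dict.empty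
  let temp := lists_of_list_of_tag_series.foldl
    (fun t tag_list => (subsequences_lengths_extractor tag_list).foldl pvCountA t) temp0
  let res := found_tags.foldl
    (fun d tag => d.insert tag (convert_to_frequency_vector (temp.getD tag PySem.Dict.empty)))
    PySem.Dict.empty
  res.items

-- ===== PORT B =====
-- the inner 'for x in sub' body of Source B: state (hist, run) for the current tag
def pvScanStep (tag : String) (s : PySem.Dict Int Int × Int) (x : String) :
    PySem.Dict Int Int × Int :=
  if x = tag then (s.1, s.2 + 1)
  else if s.2 ≠ 0 then (s.1.insert s.2 (s.1.getD s.2 0 + 1), (0 : Int)) else (s.1, (0 : Int))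

-- one 'for sub in lists' iteration: scan sub, then the trailing 'if run != 0' flush
def pvHistSub (tag : String) (h : PySem.Dict Int Int) (sub : List String) : PySem.Dict Int Int :=
  let s := sub.foldl (pvScanStep tag) (h, 0)
  if s.2 ≠ 0 then s.1.insert s.2 (s.1.getD s.2 0 + 1) else s.1

def get_frequency_of_lengths_of_subsequences_alt (lists_of_list_of_tag_series : List (List String)) :
    List (String × List Int) :=
  let flat := lists_of_list_of_tag_series.flatMap (fun sub => sub)
  (PySem.Set.ofList flat).map (fun tag =>
    let hist := lists_of_list_of_tag_series.foldl (pvHistSub tag) PySem.Dict.empty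
    (tag, (PySem.List.pyRange 0 ((PySem.List.max? hist.keys (fun k => k)).getD 0 + 1)).map
      (fun i => hist.getD i 0)))

-- ===== PRECONDITION & SPEC =====
def Spec_get_frequency_of_lengths_of_subsequences (lists_of_list_of_tag_series : List (List String)) (out : List (String × List Int)) : Prop := out = get_frequency_of_lengths_of_subsequences_alt lists_of_list_of_tag_series
instance (lists_of_list_of_tag_series : List (List String)) (out : List (String × List Int)) : Decidable (Spec_get_frequency_of_lengths_of_subsequences lists_of_list_of_tag_series out) := by unfold Spec_get_frequency_of_lengths_of_subsequences; infer_instance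

-- ===== CLAIM (what is proved, stated in full; the proofs are below) =====
def Claim_equal_get_frequency_of_lengths_of_subsequences : Prop := ∀ (lists_of_list_of_tag_series : List (List String)), Dom_get_frequency_of_lengths_of_subsequences lists_of_list_of_tag_series → Spec_get_frequency_of_lengths_of_subsequences lists_of_list_of_tag_series (get_frequency_of_lengths_of_subsequences lists_of_list_of_tag_series)

-- ===== LEMMAS AND PROOFS =====

-- the common counting step both sides reduce to
def pvStep (d : PySem.Dict String (PySem.Dict Int Int)) (r : String × Int) :
    PySem.Dict String (PySem.Dict Int Int) :=
  d.insert r.1 ((d.getD r.1 PySem.Dict.empty).insert r.2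
    ((d.getD r.1 PySem.Dict.empty).getD r.2 0 + 1))

def pvRunsStep (x : String) (runs : List (String × Int)) : List (String × Int) :=
  match runs with
  | (y, k) :: t => if y = x then (x, k + 1) :: t else (x, 1) :: (y, k) :: t
  | [] => [(x, 1)]

def pvRuns (xs : List String) : List (String × Int) := xs.foldr pvRunsStep []

def pvR (lists : List (List String)) : List (String × Int) := lists.flatMap pvRuns

def pvLens (t : String) (S : List (String × Int)) : List Int :=
  (S.filter (fun p => p.1 == t)).map (·.2)

def pvMerge (p : String) (k : Int) (rs : List (String × Int)) : List (String × Int) :=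
  match rs with
  | (y, m) :: t => if y = p then (p, k + m) :: t else (p, k) :: rs
  | [] => [(p, k)]

-- the t-run lengths of xs when a partial t-run of length r is already open
def pvTLens (t : String) (r : Int) (xs : List String) : List Int :=
  match xs with
  | [] => if r ≠ 0 then [r] else []
  | x :: xs' =>
      if x = t then pvTLens t (r + 1) xs'
      else (if r ≠ 0 then [r] else []) ++ pvTLens t 0 xs'

def pvIns (c : PySem.Dict Int Int) (l : Int) : PySem.Dict Int Int :=
  c.insert l (c.getD l 0 + 1)

lemma pvCountA_eq (d : PySem.Dict String (PySem.Dict Int Int)) (r : String × Int) :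
    pvCountA d r = pvStep d r := by
  unfold pvCountA pvStep
  by_cases h : (d.getD r.1 PySem.Dict.empty).contains r.2
  · simp [h]
  · simp [h, PySem.Dict.getD_of_not_contains _ _ (Bool.eq_false_iff.mpr h)]

lemma pvRunsStep_head (x : String) (rs : List (String × Int)) :
    ((pvRunsStep x rs).map (·.1)).head? = some x := by
  rcases rs with _ | ⟨⟨y, k⟩, t⟩ <;> simp [pvRunsStep]
  split <;> simp

lemma pvMerge_one (c : String) (rs : List (String × Int)) :
    pvMerge c 1 rs = pvRunsStep c rs := by
  rcases rs with _ | ⟨⟨y, m⟩, t⟩ <;> simp [pvMerge, pvRunsStep]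
  split <;> simp [add_comm]

lemma pvMerge_step (c : String) (k : Int) (rs : List (String × Int)) :
    pvMerge c k (pvRunsStep c rs) = pvMerge c (k + 1) rs := by
  rcases rs with _ | ⟨⟨y, m⟩, t⟩
  · simp [pvMerge, pvRunsStep]
  · by_cases h : y = c <;> simp [pvMerge, pvRunsStep, h, add_comm, add_left_comm]

lemma squoshGo_some (xs : List String) (p : String) (k : Int) (acc : List (String × Int))
    (hk : 1 ≤ k) : pvSquoshGo xs (some p) k acc = acc ++ pvMerge p k (pvRuns xs) := by
  induction xs generalizing p k acc with
  | nil =>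
      have hk0 : ¬ (k = 0) := by omega
      simp [pvSquoshGo, pvRuns, pvMerge, hk0]
  | cons c rest ih =>
      rw [pvSquoshGo]
      have hstep : pvRuns (c :: rest) = pvRunsStep c (pvRuns rest) := rfl
      by_cases hpc : c = p
      · subst hpc
        rw [if_pos (Or.inr rfl), ih c (k + 1) acc (by omega), hstep, pvMerge_step]
      · have hcond : ¬ ((some p : Option String) = none ∨ some c = some p) := by simp [hpc]
        rw [if_neg hcond, ih c 1 _ (by omega), hstep]
        rcases hrs : pvRunsStep c (pvRuns rest) with _ | ⟨⟨y, m⟩, t⟩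
        · have := pvRunsStep_head c (pvRuns rest); rw [hrs] at this; simp at this
        · have hy : y = c := by
            have := pvRunsStep_head c (pvRuns rest); rw [hrs] at this; simpa using this
          subst hy
          rw [pvMerge_one, hrs]
          simp [pvMerge, hpc]

lemma squosh_eq_runs (xs : List String) : subsequences_lengths_extractor xs = pvRuns xs := by
  rcases xs with _ | ⟨c, rest⟩
  · rfl
  · show pvSquoshGo (c :: rest) none 0 [] = _
    rw [pvSquoshGo, if_pos (Or.inl rfl), squoshGo_some rest c (0 + 1) [] (by omega)]
    have hstep : pvRuns (c :: rest) = pvRunsStep c (pvRuns rest) := rfl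
    rw [hstep, ← pvMerge_one]
    simp

lemma runs_snd_pos (xs : List String) : ∀ p ∈ pvRuns xs, 1 ≤ p.2 := by
  induction xs with
  | nil => simp [pvRuns]
  | cons c rest ih =>
      intro p hp
      have hstep : pvRuns (c :: rest) = pvRunsStep c (pvRuns rest) := rfl
      rw [hstep] at hp
      rcases hrs : pvRuns rest with _ | ⟨⟨y, m⟩, t⟩
      · rw [hrs] at hp; simp [pvRunsStep] at hp; simp [hp]
      · rw [hrs] at hp
        by_cases hyc : y = c
        · simp [pvRunsStep, hyc] at hp
          rcases hp with hp | hp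
          · have hm : 1 ≤ m := by
              have := ih (y, m) (by rw [hrs]; simp)
              simpa using this
            simp [hp]; omega
          · exact ih p (by rw [hrs]; simp [hp])
        · simp [pvRunsStep, hyc] at hp
          rcases hp with hp | hp | hp
          · simp [hp]
          · have := ih (y, m) (by rw [hrs]; simp)
            simp [hp]; simpa using this
          · exact ih p (by rw [hrs]; simp [hp])

lemma runs_ne_nil (xs : List String) (h : xs ≠ []) : pvRuns xs ≠ [] := by
  rcases xs with _ | ⟨c, rest⟩
  · exact absurd rfl h
  · have hstep : pvRuns (c :: rest) = pvRunsStep c (pvRuns rest) := rfl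
    rw [hstep]
    rcases pvRuns rest with _ | ⟨⟨y, m⟩, t⟩ <;> simp [pvRunsStep]
    split <;> simp

lemma runs_head_fst (xs : List String) : ((pvRuns xs).map (·.1)).head? = xs.head? := by
  rcases xs with _ | ⟨c, rest⟩
  · rfl
  · have hstep : pvRuns (c :: rest) = pvRunsStep c (pvRuns rest) := rfl
    rw [hstep, pvRunsStep_head]
    rfl

lemma foldl_add_runs (xs : List String) (s : PySem.Set String) :
    ((pvRuns xs).map (·.1)).foldl PySem.Set.add s = xs.foldl PySem.Set.add s := by
  induction xs generalizing s with
  | nil => simp [pvRuns]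
  | cons c rest ih =>
      have hstep : pvRuns (c :: rest) = pvRunsStep c (pvRuns rest) := rfl
      rw [hstep]
      rcases hrs : pvRuns rest with _ | ⟨⟨y, m⟩, t⟩
      · have hrest : rest = [] := by
          by_contra h; exact runs_ne_nil rest h hrs
        subst hrest
        simp [pvRunsStep]
      · have hhd : rest.head? = some y := by
          rw [← runs_head_fst, hrs]; rfl
        rcases rest with _ | ⟨r0, r'⟩
        · simp at hhd
        · have hr0 : r0 = y := by simpa using hhd
          subst hr0
          by_cases hyc : r0 = c
          · have hmap : (pvRunsStep c ((r0, m) :: t)).map (fun p => p.1)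
                = ((r0, m) :: t).map (fun p => p.1) := by simp [pvRunsStep, hyc]
            rw [hmap, ← hrs, ih s, hyc]
            simp only [List.foldl_cons]
            rw [PySem.Set.add_of_mem ((PySem.Set.mem_add s c c).mpr (Or.inr rfl))]
          · have hmap : (pvRunsStep c ((r0, m) :: t)).map (fun p => p.1)
                = c :: ((r0, m) :: t).map (fun p => p.1) := by simp [pvRunsStep, hyc]
            rw [hmap]
            simp only [List.foldl_cons]
            rw [← hrs, ih (PySem.Set.add s c)]
            simp only [List.foldl_cons]

lemma pvFoldlAddFlat (lists : List (List String)) (s : PySem.Set String) :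
    lists.foldl (fun acc x => List.foldl PySem.Set.add acc ((pvRuns x).map (fun p => p.1))) s
      = lists.foldl (fun acc x => List.foldl PySem.Set.add acc x) s := by
  induction lists generalizing s with
  | nil => rfl
  | cons l ls ih =>
      simp only [List.foldl_cons]
      rw [foldl_add_runs, ih]

lemma ofList_R_fst (lists : List (List String)) :
    PySem.Set.ofList ((pvR lists).map (·.1))
      = PySem.Set.ofList (lists.flatMap (fun sub => sub)) := by
  unfold pvR
  rw [List.map_flatMap]
  rw [PySem.Set.ofList_eq_foldl, PySem.Set.ofList_eq_foldl, List.foldl_flatMap,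
    List.foldl_flatMap]
  exact pvFoldlAddFlat lists []

lemma getD_seed (ts : List String) (d : PySem.Dict String (PySem.Dict Int Int))
    (h : ∀ t, d.getD t PySem.Dict.empty = PySem.Dict.empty) (t : String) :
    (ts.foldl (fun d tag => d.insert tag PySem.Dict.empty) d).getD t PySem.Dict.empty
      = PySem.Dict.empty := by
  induction ts generalizing d with
  | nil => simpa using h t
  | cons a ts ih =>
      simp only [List.foldl_cons]
      refine ih _ (fun t' => ?_)
      rw [PySem.Dict.getD_insert]
      split
      · rfl
      · exact h t'

lemma getD_stepFold (S : List (String × Int)) (d : PySem.Dict String (PySem.Dict Int Int))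
    (t : String) :
    (S.foldl pvStep d).getD t PySem.Dict.empty
      = (pvLens t S).foldl (fun c l => c.insert l (c.getD l 0 + 1)) (d.getD t PySem.Dict.empty) := by
  induction S generalizing d with
  | nil => rfl
  | cons p S' ih =>
      simp only [List.foldl_cons]
      rw [ih]
      by_cases h : p.1 = t
      · have hl : pvLens t (p :: S') = p.2 :: pvLens t S' := by
          simp [pvLens, h]
        rw [hl]
        simp only [List.foldl_cons]
        have : (pvStep d p).getD t PySem.Dict.empty
            = (d.getD t PySem.Dict.empty).insert p.2
              ((d.getD t PySem.Dict.empty).getD p.2 0 + 1) := by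
          rw [pvStep, PySem.Dict.getD_insert, if_pos h.symm, h]
        rw [this]
      · have hl : pvLens t (p :: S') = pvLens t S' := by
          simp [pvLens, h]
        rw [hl]
        have : (pvStep d p).getD t PySem.Dict.empty = d.getD t PySem.Dict.empty := by
          rw [pvStep, PySem.Dict.getD_insert, if_neg (fun hh => h hh.symm)]
        rw [this]

lemma getD_stepFold_counter (S : List (String × Int)) (d : PySem.Dict String (PySem.Dict Int Int))
    (h : d.getD t PySem.Dict.empty = PySem.Dict.empty) :
    (S.foldl pvStep d).getD t PySem.Dict.empty = PySem.Dict.counter (pvLens t S) := by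
  rw [getD_stepFold, h, PySem.Dict.foldl_insert_getD_add_one_eq_counter]

-- ===== B-side lemmas: the per-tag scan computes exactly the t-run lengths =====

lemma scan_eq_tlens (t : String) (xs : List String) :
    ∀ (h : PySem.Dict Int Int) (r : Int),
      (let s := xs.foldl (pvScanStep t) (h, r)
       if s.2 ≠ 0 then s.1.insert s.2 (s.1.getD s.2 0 + 1) else s.1)
        = (pvTLens t r xs).foldl pvIns h := by
  induction xs with
  | nil =>
      intro h r
      by_cases hr : r = 0 <;> simp [pvTLens, pvIns, hr]
  | cons x xs' ih =>
      intro h r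
      by_cases hx : x = t
      · simpa [pvScanStep, pvTLens, hx] using ih h (r + 1)
      · by_cases hr : r = 0
        · simpa [pvScanStep, pvTLens, hx, hr] using ih h 0
        · simpa [pvScanStep, pvTLens, pvIns, hx, hr] using
            ih (h.insert r (h.getD r 0 + 1)) 0

lemma histSub_eq (t : String) (h : PySem.Dict Int Int) (sub : List String) :
    pvHistSub t h sub = (pvTLens t 0 sub).foldl pvIns h := by
  simpa [pvHistSub] using scan_eq_tlens t sub h 0

lemma lens_runsStep_ne (t x : String) (hx : x ≠ t) (rs : List (String × Int)) :
    pvLens t (pvRunsStep x rs) = pvLens t rs := by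
  rcases rs with _ | ⟨⟨y, m⟩, tl⟩
  · simp [pvRunsStep, pvLens, hx]
  · by_cases hy : y = x
    · subst hy; simp [pvRunsStep, pvLens, hx]
    · simp [pvRunsStep, pvLens, hy, hx]

lemma merge_of_head_ne (t : String) (r : Int) (rs : List (String × Int))
    (h : (rs.map (·.1)).head? ≠ some t) : pvMerge t r rs = (t, r) :: rs := by
  rcases rs with _ | ⟨⟨y, m⟩, tl⟩
  · rfl
  · have hy : y ≠ t := by simpa using h
    simp [pvMerge, hy]

lemma tlens_spec (t : String) (xs : List String) :
    (∀ r : Int, 1 ≤ r → pvTLens t r xs = pvLens t (pvMerge t r (pvRuns xs)))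
      ∧ pvTLens t 0 xs = pvLens t (pvRuns xs) := by
  induction xs with
  | nil =>
      constructor
      · intro r hr
        have : ¬ (r = 0) := by omega
        simp [pvTLens, pvRuns, pvMerge, pvLens, this]
      · simp [pvTLens, pvRuns, pvLens]
  | cons x xs' ih =>
      have hstep : pvRuns (x :: xs') = pvRunsStep x (pvRuns xs') := rfl
      by_cases hx : x = t
      · subst hx
        constructor
        · intro r hr
          rw [hstep, pvMerge_step]
          simpa [pvTLens] using ih.1 (r + 1) (by omega)
        · rw [hstep, ← pvMerge_one]
          simpa [pvTLens] using ih.1 1 (by omega)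
      · have hhd : ((pvRunsStep x (pvRuns xs')).map (·.1)).head? ≠ some t := by
          rw [pvRunsStep_head]; simpa using hx
        constructor
        · intro r hr
          have hr0 : ¬ (r = 0) := by omega
          have hL : pvTLens t r (x :: xs') = r :: pvTLens t 0 xs' := by
            simp [pvTLens, hx, hr0]
          have hRhs : pvLens t ((t, r) :: pvRunsStep x (pvRuns xs'))
              = r :: pvLens t (pvRunsStep x (pvRuns xs')) := by
            simp [pvLens]
          rw [hstep, merge_of_head_ne t r _ hhd, hL, hRhs, lens_runsStep_ne t x hx, ih.2]
        · rw [hstep, lens_runsStep_ne t x hx, ← ih.2]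
          simp [pvTLens, hx]

lemma lens_append (t : String) (a b : List (String × Int)) :
    pvLens t (a ++ b) = pvLens t a ++ pvLens t b := by
  simp [pvLens, List.filter_append]

lemma lens_R (t : String) (lists : List (List String)) :
    pvLens t (pvR lists) = lists.flatMap (fun sub => pvLens t (pvRuns sub)) := by
  induction lists with
  | nil => rfl
  | cons l ls ih =>
      have : pvR (l :: ls) = pvRuns l ++ pvR ls := rfl
      rw [this, lens_append, ih]
      rfl

lemma hist_eq_counter (t : String) (lists : List (List String)) :
    lists.foldl (pvHistSub t) PySem.Dict.empty = PySem.Dict.counter (pvLens t (pvR lists)) := by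
  have h1 : lists.foldl (pvHistSub t) PySem.Dict.empty
      = lists.foldl (fun h sub => (pvTLens t 0 sub).foldl pvIns h) PySem.Dict.empty :=
    PySem.List.foldl_congr_mem _ _ _ _ (fun h sub _ => histSub_eq t h sub)
  have h2 : lists.foldl (fun h sub => (pvTLens t 0 sub).foldl pvIns h) PySem.Dict.empty
      = (lists.flatMap (fun sub => pvTLens t 0 sub)).foldl pvIns PySem.Dict.empty :=
    (List.foldl_flatMap).symm
  have h3 : lists.flatMap (fun sub => pvTLens t 0 sub)
      = pvLens t (pvR lists) := by
    rw [lens_R]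
    exact List.flatMap_congr (fun sub _ => (tlens_spec t sub).2)
  rw [h1, h2, h3]
  exact PySem.Dict.foldl_insert_getD_add_one_eq_counter _ 

-- conversion of a counter to the dense vector, both shapes
lemma setFold_length (ps : List (Int × Int)) (v : List Int) :
    (ps.foldl (fun v p => PySem.List.pySetD v p.1 p.2) v).length = v.length := by
  induction ps generalizing v with
  | nil => rfl
  | cons p ps ih => simp only [List.foldl_cons]; rw [ih, PySem.List.length_pySetD]

lemma setFold_not_mem (ps : List (Int × Int)) (v : List Int) (j : Nat)
    (hnn : ∀ p ∈ ps, 0 ≤ p.1) (hj : (j : Int) ∉ ps.map (·.1)) :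
    (ps.foldl (fun v p => PySem.List.pySetD v p.1 p.2) v)[j]? = v[j]? := by
  induction ps generalizing v with
  | nil => rfl
  | cons a ps ih =>
      simp only [List.foldl_cons]
      have ha : (0 : Int) ≤ a.1 := hnn a (by simp)
      have hja : ¬ (j : Int) = a.1 := by simp at hj; exact hj.1
      rw [ih _ (fun p hp => hnn p (by simp [hp])) (by simp at hj ⊢; exact hj.2),
        PySem.List.pySetD_of_nonneg _ _ ha,
        List.getElem?_set_ne (by omega)]

lemma setFold_get (ps : List (Int × Int)) (v : List Int) (j : Nat)
    (hnd : (ps.map (·.1)).Nodup) (hnn : ∀ p ∈ ps, 0 ≤ p.1) (hlt : j < v.length)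
    (q : Int × Int) (hq : q ∈ ps) (hfst : q.1 = (j : Int)) :
    (ps.foldl (fun v p => PySem.List.pySetD v p.1 p.2) v)[j]? = some q.2 := by
  induction ps generalizing v with
  | nil => simp at hq
  | cons a ps ih =>
      simp only [List.foldl_cons]
      have ha : (0 : Int) ≤ a.1 := hnn a (by simp)
      rcases List.mem_cons.mp hq with hq' | hq'
      · subst hq'
        have hnotin : (j : Int) ∉ ps.map (·.1) := by
          rw [← hfst]
          simp only [List.map_cons, List.nodup_cons] at hnd
          exact hnd.1
        rw [setFold_not_mem ps _ j (fun p hp => hnn p (by simp [hp])) hnotin,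
          PySem.List.pySetD_of_nonneg _ _ ha]
        have : q.1.toNat = j := by omega
        rw [this, List.getElem?_set_self (by omega)]
      · have hlen : j < (PySem.List.pySetD v a.1 a.2).length := by
          rw [PySem.List.length_pySetD]; exact hlt
        exact ih _ (by simp only [List.map_cons, List.nodup_cons] at hnd; exact hnd.2)
          (fun p hp => hnn p (by simp [hp])) hlen hq'

lemma conv_eq_vec (ls : List Int) (hne : ls ≠ []) (hpos : ∀ l ∈ ls, 1 ≤ l) :
    convert_to_frequency_vector (PySem.Dict.counter ls)
      = (PySem.List.pyRange 0
          ((PySem.List.max? (PySem.Dict.counter ls).keys (fun k => k)).getD 0 + 1)).map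
          (fun i => (PySem.Dict.counter ls).getD i 0) := by
  have hkeys : (PySem.Dict.counter ls).keys = PySem.Set.ofList ls := PySem.Dict.keys_counter ls
  rcases hmax : PySem.List.max? (PySem.Dict.counter ls).keys (fun k => k) with _ | m
  · exfalso
    rw [PySem.List.max?_eq_none_iff, hkeys] at hmax
    rcases ls with _ | ⟨x, ls'⟩
    · exact hne rfl
    · have : x ∈ PySem.Set.ofList (x :: ls') := (PySem.Set.mem_ofList _ _).mpr (by simp)
      rw [hmax] at this
      simp at this
  · have hmmem : m ∈ ls := by
      have := PySem.List.max?_mem hmax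
      rw [hkeys, PySem.Set.mem_ofList] at this
      exact this
    have hm1 : 1 ≤ m := hpos m hmmem
    have hub : ∀ k ∈ PySem.Set.ofList ls, k ≤ m := by
      intro k hk
      exact PySem.List.max?_isMax hmax k (by rw [hkeys]; exact hk)
    set n : Nat := (m + 1).toNat with hn
    have hcast : ((n : Nat) : Int) = m + 1 := by omega
    have hrange : PySem.List.pyRange 0 (m + 1) = (List.range n).map (fun k : Nat => (k : Int)) := by
      rw [← hcast, PySem.List.pyRange_zero_natCast]
    simp only [convert_to_frequency_vector, hmax, Option.getD_some]
    rw [hrange]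
    have hv0 : ((List.range n).map (fun k : Nat => (k : Int))).map (fun _ => (0 : Int))
        = List.replicate n (0 : Int) := by
      rw [List.map_map,
        show ((fun _ : Int => (0 : Int)) ∘ fun k : Nat => (k : Int)) = (fun _ : Nat => (0 : Int))
          from rfl,
        List.map_const', List.length_range]
    rw [hv0, PySem.Dict.items_counter]
    set ps : List (Int × Int) := (PySem.Set.ofList ls).map (fun k => (k, (ls.count k : Int)))
      with hps
    have hpsfst : ps.map (·.1) = PySem.Set.ofList ls := by
      rw [hps, List.map_map,
        show ((fun x : Int × Int => x.1) ∘ fun k : Int => (k, (ls.count k : Int))) = id from rfl,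
        List.map_id]
    have hnd : (ps.map (·.1)).Nodup := by rw [hpsfst]; exact PySem.Set.nodup_ofList ls
    have hnn : ∀ p ∈ ps, 0 ≤ p.1 := by
      intro p hp
      rw [hps] at hp
      rcases List.mem_map.mp hp with ⟨k, hk, rfl⟩
      have h1k : 1 ≤ k := hpos k ((PySem.Set.mem_ofList _ _).mp hk)
      show (0 : Int) ≤ k
      omega
    apply List.ext_getElem?
    intro j
    by_cases hjn : j < n
    · have hrhs : (((List.range n).map (fun k : Nat => (k : Int))).map
          (fun i => (PySem.Dict.counter ls).getD i 0))[j]? = some ((ls.count (j : Int) : Int)) := by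
        rw [List.map_map]
        rw [List.getElem?_map, List.getElem?_range hjn]
        simp [PySem.Dict.getD_counter]
      rw [hrhs]
      by_cases hmem : (j : Int) ∈ PySem.Set.ofList ls
      · have hq : ((j : Int), (ls.count (j : Int) : Int)) ∈ ps := by
          rw [hps]
          exact List.mem_map.mpr ⟨(j : Int), hmem, rfl⟩
        exact setFold_get ps _ j hnd hnn (by simp [List.length_replicate, hjn]) _ hq rfl
      · have hnotin : (j : Int) ∉ ps.map (·.1) := by rw [hpsfst]; exact hmem
        rw [setFold_not_mem ps _ j hnn hnotin]
        have hcount : ls.count (j : Int) = 0 :=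
          List.count_eq_zero.mpr (fun h => hmem ((PySem.Set.mem_ofList _ _).mpr h))
        rw [hcount, List.getElem?_replicate]
        simp [hjn]
    · have h1 : (ps.foldl (fun v p => PySem.List.pySetD v p.1 p.2)
          (List.replicate n (0 : Int))).length = n := by
        rw [setFold_length, List.length_replicate]
      rw [List.getElem?_eq_none (by rw [h1]; omega),
        List.getElem?_eq_none (by simp; omega)]

-- ===== VERDICT (by name: the statement is the Claim_ definition above) =====
theorem get_frequency_of_lengths_of_subsequences_spec : Claim_equal_get_frequency_of_lengths_of_subsequences := by
  intro lists _hdom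
  unfold Spec_get_frequency_of_lengths_of_subsequences
  have hCA : pvCountA = pvStep := funext fun d => funext fun r => pvCountA_eq d r
  have hsq : subsequences_lengths_extractor = pvRuns := funext squosh_eq_runs
  simp only [get_frequency_of_lengths_of_subsequences,
    get_frequency_of_lengths_of_subsequences_alt, get_list_of_tags, hCA, hsq]
  have hAfold : List.foldl (fun t tag_list => List.foldl pvStep t (pvRuns tag_list))
      (List.foldl (fun d tag => d.insert tag PySem.Dict.empty) PySem.Dict.empty
        (PySem.Set.ofList (List.flatMap (fun sublist => sublist) lists))) lists
      = List.foldl pvStep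
          (List.foldl (fun d tag => d.insert tag PySem.Dict.empty) PySem.Dict.empty
            (PySem.Set.ofList (List.flatMap (fun sublist => sublist) lists))) (pvR lists) :=
    (List.foldl_flatMap).symm
  rw [hAfold]
  set R := pvR lists with hR
  set found := PySem.Set.ofList (List.flatMap (fun sublist => sublist) lists) with hfound
  set temp0 := List.foldl (fun d tag => d.insert tag PySem.Dict.empty) PySem.Dict.empty found
    with htemp0
  set tempA := List.foldl pvStep temp0 R with htempA
  have hfnd : found.Nodup := by rw [hfound]; exact PySem.Set.nodup_ofList _
  have htemp0getD : ∀ u, temp0.getD u PySem.Dict.empty = PySem.Dict.empty := by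
    intro u
    rw [htemp0]
    exact getD_seed found PySem.Dict.empty (fun t' => PySem.Dict.getD_empty _ _) u
  have hgA : ∀ t, tempA.getD t PySem.Dict.empty = PySem.Dict.counter (pvLens t R) := by
    intro t
    rw [htempA]
    exact getD_stepFold_counter R temp0 (htemp0getD t)
  have hAitems : (List.foldl
        (fun d tag => d.insert tag (convert_to_frequency_vector (tempA.getD tag PySem.Dict.empty)))
        PySem.Dict.empty found).items
      = found.map (fun t => (t, convert_to_frequency_vector (tempA.getD t PySem.Dict.empty))) := by
    have := PySem.Dict.items_foldl_insert_fresh found (fun t => t)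
      (fun t => convert_to_frequency_vector (tempA.getD t PySem.Dict.empty)) PySem.Dict.empty
      (fun a _ => PySem.Dict.contains_empty a) (by simpa [List.map_id] using hfnd)
    simpa using this
  rw [hAitems]
  refine List.map_congr_left ?_
  intro t ht
  rw [hgA t, hist_eq_counter t lists, ← hR]
  have htR : t ∈ R.map (fun r => r.1) := by
    have : t ∈ PySem.Set.ofList (R.map (·.1)) := by
      rw [hR, ofList_R_fst lists, ← hfound]; exact ht
    exact (PySem.Set.mem_ofList _ _).mp this
  rcases List.mem_map.mp htR with ⟨r, hrR, hrt⟩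
  have hmemlens : r.2 ∈ pvLens t R :=
    List.mem_map.mpr ⟨r, List.mem_filter.mpr ⟨hrR, by simp [hrt]⟩, rfl⟩
  have hne : pvLens t R ≠ [] := List.ne_nil_of_mem hmemlens
  have hpos : ∀ l ∈ pvLens t R, 1 ≤ l := by
    intro l hl
    rcases List.mem_map.mp hl with ⟨p, hpf, rfl⟩
    have hpR : p ∈ R := List.mem_of_mem_filter hpf
    rw [hR] at hpR
    rcases List.mem_flatMap.mp hpR with ⟨xs, _, hpxs⟩
    exact runs_snd_pos xs p hpxs
  rw [conv_eq_vec (pvLens t R) hne hpos]
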